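-- pv_equiv track=rewrite | github.com/smsstion/WordPress_additional_article | 高级文本后处理与格式化系统.py | format_with_blank_lines
-- ===== SOURCE A (Python) =====
-- WHITESPACE_CHARS = [
--     ' ',        # 普通空格 (U+0020)
--     '\u00A0',   # 不换行空格 (U+00A0)
--     '\u2000',   # 半身空铅 (U+2000)
--     '\u2001',   # 全身空铅 (U+2001)
--     '\u2002',   # 半方空铅 (U+2002)
--     '\u2003',   # 方空铅 (U+2003)
--     '\u2004',   # 三分之一方空铅 (U+2004)
--     '\u2005',   # 四分之一方空铅 (U+2005)
--     '\u2006',   # 六分之一方空铅 (U+2006)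
--     '\u2007',   # 数字空格 (U+2007)
--     '\u2008',   # 标点空格 (U+2008)
--     '\u2009',   # 细空格 (U+2009)
--     '\u200A',   # 极细空格 (U+200A)
--     '\u202F',   # 窄不换行空格 (U+202F)
--     '\u205F',   # 中等数学空格 (U+205F)
--     '\u3000',   # 全角空格 (U+3000)
--     '\uFEFF',   # 零宽不换行空格 (U+FEFF)
--     '\t',       # 制表符 (U+0009)
--     '\v',       # 垂直制表符 (U+000B)
--     '\f',       # 换页符 (U+000C)
--     '\r',       # 回车符 (U+000D)
--     '\n',       # 换行符 (U+000A)
-- ]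
--
-- def format_with_blank_lines(lines):
--     """格式化输出：确保非空段落间有且仅有一个空行"""
--     if not lines:
--         return ""
--
--     # 第一步：移除连续的空行，保留单个空行
--     condensed_lines = []
--     prev_was_empty = False
--     for line in lines:
--         # 检查是否为空行（只包含空白字符）
--         is_empty = all(char in WHITESPACE_CHARS for char in line.rstrip())
--
--         if is_empty:
--             # 如果是空行，但前一行不是空行，则保留一个空行
--             if not prev_was_empty:
--                 condensed_lines.append('\n')
--             prev_was_empty = True
--         else:
--             # 非空行直接保留
--             condensed_lines.append(line)
--             prev_was_empty = False
--
--     # 第二步：构建最终输出，确保非空段落间有且仅有一个空行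
--     formatted_lines = []
--     prev_was_content = False
--
--     for line in condensed_lines:
--         # 检查当前行是否为内容行（非空行）
--         is_content = not all(char in WHITESPACE_CHARS for char in line.rstrip())
--
--         if is_content:
--             # 如果前一行是内容行，则在中间添加一个空行
--             if prev_was_content:
--                 formatted_lines.append('\n')
--             # 添加当前内容行（保留原始内容）
--             formatted_lines.append(line.rstrip() + '\n')
--             prev_was_content = True
--         else:
--             # 空行保留（但我们已经在上一步确保只有一个空行）
--             formatted_lines.append(line)
--             prev_was_content = False
--
--     # 第三步：处理首尾空行
--     # 移除开头的空行
--     while formatted_lines and formatted_lines[0] == '\n':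
--         formatted_lines.pop(0)
--
--     # 移除结尾的连续空行，保留一个换行符
--     while len(formatted_lines) > 1 and formatted_lines[-1] == '\n' and formatted_lines[-2] == '\n':
--         formatted_lines.pop()
--
--     return ''.join(formatted_lines)
-- ===== SOURCE B (Python) =====
-- WHITESPACE_CHARS = [
--     ' ', '\u00A0', '\u2000', '\u2001', '\u2002', '\u2003', '\u2004',
--     '\u2005', '\u2006', '\u2007', '\u2008', '\u2009', '\u200A',
--     '\u202F', '\u205F', '\u3000', '\uFEFF', '\t', '\v', '\f', '\r', '\n',
-- ]
--
--
-- def _is_empty(line):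
--     return all(char in WHITESPACE_CHARS for char in line.rstrip())
--
--
-- def format_with_blank_lines(lines):
--     """格式化输出：确保非空段落间有且仅有一个空行"""
--     if not lines:
--         return ""
--     contents = [line.rstrip() for line in lines if not _is_empty(line)]
--     if not contents:
--         return ""
--     out = "\n".join(c + "\n" for c in contents)
--     if _is_empty(lines[-1]):
--         out += "\n"
--     return out
-- ===== Notes on version B (the rewrite author's own statement) =====
-- stated objective: simpler
-- what changed: Replaced A's three stateful passes (condense blank runs, re-interleave separators, then two trim-while loops) with a single filter of the non-blank lines followed by one '\n'.join, plus one trailing newline exactly when the last input line is blank.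
import Mathlib
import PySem

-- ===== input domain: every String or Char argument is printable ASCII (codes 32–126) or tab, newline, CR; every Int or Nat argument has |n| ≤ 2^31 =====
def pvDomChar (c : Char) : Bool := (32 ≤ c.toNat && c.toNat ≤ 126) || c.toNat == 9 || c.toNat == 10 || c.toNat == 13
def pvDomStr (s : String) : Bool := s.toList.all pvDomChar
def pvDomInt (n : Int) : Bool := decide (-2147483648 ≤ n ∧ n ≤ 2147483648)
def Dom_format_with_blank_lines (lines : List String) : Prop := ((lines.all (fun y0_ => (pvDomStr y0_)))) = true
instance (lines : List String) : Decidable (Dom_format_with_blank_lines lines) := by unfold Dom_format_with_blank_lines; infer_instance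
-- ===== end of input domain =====

-- B replaces A's three stateful passes and two trim loops by one filter-and-join (objective: simpler).

-- ===== PORT A =====
-- the module constant WHITESPACE_CHARS (a list of 1-char strings; membership of a char is char membership)
def pvWS : List Char :=
  [' ', '\u00A0', '\u2000', '\u2001', '\u2002', '\u2003', '\u2004',
   '\u2005', '\u2006', '\u2007', '\u2008', '\u2009', '\u200A',
   '\u202F', '\u205F', '\u3000', '\uFEFF', '\t', '\u000B', '\u000C', '\r', '\n']

-- `all(char in WHITESPACE_CHARS for char in line.rstrip())`
def pvIsEmpty (line : String) : Bool :=
  (PySem.Str.rstrip line).toList.all (fun c => pvWS.contains c)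

-- `while formatted_lines and formatted_lines[0] == '\n': formatted_lines.pop(0)`
def pvTrimHead : List String → List String
  | [] => []
  | l :: ls => if l = "\n" then pvTrimHead ls else l :: ls

-- `while len(...) > 1 and ...[-1] == '\n' and ...[-2] == '\n': ....pop()`
def pvTrimTail (l : List String) : List String :=
  if 1 < l.length ∧ l.getLast? = some "\n" ∧ l.dropLast.getLast? = some "\n"
  then pvTrimTail l.dropLast else l
termination_by l.length
decreasing_by simp [List.length_dropLast]; omega

def format_with_blank_lines (lines : List String) : String :=
  if lines = [] then "" else
    let condensed := (lines.foldl (fun (st : List String × Bool) line =>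
        if pvIsEmpty line then
          (if st.2 = false then st.1 ++ ["\n"] else st.1, true)
        else (st.1 ++ [line], false)) (([] : List String), false)).1
    let formatted := (condensed.foldl (fun (st : List String × Bool) line =>
        if pvIsEmpty line = false then
          ((if st.2 then st.1 ++ ["\n"] else st.1) ++ [PySem.Str.rstrip line ++ "\n"], true)
        else (st.1 ++ [line], false)) (([] : List String), false)).1
    PySem.Str.join "" (pvTrimTail (pvTrimHead formatted))

-- ===== PORT B =====
def format_with_blank_lines_alt (lines : List String) : String :=
  if lines = [] then "" else
    let contents := (lines.filter (fun l => !pvIsEmpty l)).map PySem.Str.rstrip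
    if contents = [] then "" else
      let out := PySem.Str.join "\n" (contents.map (fun c => c ++ "\n"))
      if pvIsEmpty (lines.getLastD "") then out ++ "\n" else out

-- ===== PRECONDITION & SPEC =====
def Spec_format_with_blank_lines (lines : List String) (out : String) : Prop := out = format_with_blank_lines_alt lines
instance (lines : List String) (out : String) : Decidable (Spec_format_with_blank_lines lines out) := by unfold Spec_format_with_blank_lines; infer_instance

-- ===== CLAIM (what is proved, stated in full; the proofs are below) =====
def Claim_equal_format_with_blank_lines : Prop := ∀ (lines : List String), Dom_format_with_blank_lines lines → Spec_format_with_blank_lines lines (format_with_blank_lines lines)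

-- ===== LEMMAS AND PROOFS =====

-- structural form of A's first pass (condense blank runs)
def pvCond : List String → Bool → List String
  | [], _ => []
  | l :: ls, p =>
      if pvIsEmpty l then (if p then pvCond ls true else "\n" :: pvCond ls true)
      else l :: pvCond ls false

-- structural form of A's second pass
def pvFmt : List String → Bool → List String
  | [], _ => []
  | l :: ls, p =>
      if pvIsEmpty l = false then
        (if p then ["\n"] else []) ++ (PySem.Str.rstrip l ++ "\n") :: pvFmt ls true
      else l :: pvFmt ls false

-- B's content list
def pvCs (ls : List String) : List String := (ls.filter (fun l => !pvIsEmpty l)).map PySem.Str.rstrip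

-- the paragraph body: content chunks separated by single blank lines
def pvMid : List String → List String
  | [] => []
  | [c] => [c ++ "\n"]
  | c :: c' :: cs => (c ++ "\n") :: "\n" :: pvMid (c' :: cs)

lemma pvCond_foldl (ls : List String) : ∀ (acc : List String) (p : Bool),
    (ls.foldl (fun (st : List String × Bool) line =>
        if pvIsEmpty line then
          (if st.2 = false then st.1 ++ ["\n"] else st.1, true)
        else (st.1 ++ [line], false)) (acc, p)).1 = acc ++ pvCond ls p := by
  induction ls with
  | nil => intro acc p; simp [pvCond]
  | cons l ls ih =>
    intro acc p
    by_cases h : pvIsEmpty l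
    · cases p <;> simp [h, pvCond, ih]
    · simp [h, pvCond, ih]

lemma pvFmt_foldl (ls : List String) : ∀ (acc : List String) (p : Bool),
    (ls.foldl (fun (st : List String × Bool) line =>
        if pvIsEmpty line = false then
          ((if st.2 then st.1 ++ ["\n"] else st.1) ++ [PySem.Str.rstrip line ++ "\n"], true)
        else (st.1 ++ [line], false)) (acc, p)).1 = acc ++ pvFmt ls p := by
  induction ls with
  | nil => intro acc p; simp [pvFmt]
  | cons l ls ih =>
    intro acc p
    by_cases h : pvIsEmpty l
    · simp [h, pvFmt, ih]
    · cases p <;> simp [h, pvFmt, ih]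

lemma pvIsEmpty_nl : pvIsEmpty "\n" = true := by decide

lemma rstrip_ne_empty_of_content {l : String} (h : pvIsEmpty l = false) :
    PySem.Str.rstrip l ≠ "" := by
  intro he
  unfold pvIsEmpty at h
  rw [he] at h
  simp at h

-- the leading piece of the intermediate list, and the rest of it
def pvPre (ls : List String) (p1 p2 : Bool) : List String :=
  match ls with
  | [] => []
  | l :: _ => if pvIsEmpty l then (if p1 then [] else ["\n"]) else (if p2 then ["\n"] else [])

def pvSuf (ls : List String) : List String :=
  if pvCs ls = [] then []
  else pvMid (pvCs ls) ++ (if pvIsEmpty (ls.getLastD "") then ["\n"] else [])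

lemma pvLastD_cons {l : String} {ls : List String} (h : ls ≠ []) :
    (l :: ls).getLastD "" = ls.getLastD "" := by
  cases ls with
  | nil => simp at h
  | cons a t => simp

lemma pvGetLastD_mem {ls : List String} (h : ls ≠ []) : ls.getLastD "" ∈ ls := by
  cases ls with
  | nil => simp at h
  | cons a t =>
    rw [List.getLastD_cons]
    exact List.getLastD_mem_cons

lemma pvCs_nil_all_blank {ls : List String} (h : pvCs ls = []) :
    ∀ l ∈ ls, pvIsEmpty l = true := by
  intro l hl
  unfold pvCs at h
  rw [List.map_eq_nil_iff, List.filter_eq_nil_iff] at h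
  simpa using h l hl

lemma pvBlank_last {ls : List String} (hc : pvCs ls = []) (hne : ls ≠ []) :
    pvIsEmpty (ls.getLastD "") = true :=
  pvCs_nil_all_blank hc _ (pvGetLastD_mem hne)

lemma pvMid_cons {c : String} {cs : List String} (h : cs ≠ []) :
    pvMid (c :: cs) = (c ++ "\n") :: "\n" :: pvMid cs := by
  cases cs with
  | nil => simp at h
  | cons a t => rfl

lemma pvSuf_cons_blank {l : String} {ls : List String} (h : pvIsEmpty l = true) :
    pvSuf (l :: ls) = pvSuf ls := by
  have hcc : pvCs (l :: ls) = pvCs ls := by simp [pvCs, h]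
  by_cases hc : pvCs ls = []
  · unfold pvSuf
    rw [hcc, hc]
    simp
  · have hne : ls ≠ [] := by intro e; subst e; simp [pvCs] at hc
    unfold pvSuf
    rw [hcc, pvLastD_cons hne]

lemma pvSuf_cons_content {l : String} {ls : List String} (h' : pvIsEmpty l = false)
    (hne : ls ≠ []) :
    pvSuf (l :: ls) = (PySem.Str.rstrip l ++ "\n") :: "\n" :: pvSuf ls := by
  have hcc : pvCs (l :: ls) = PySem.Str.rstrip l :: pvCs ls := by simp [pvCs, h']
  by_cases hc : pvCs ls = []
  · unfold pvSuf
    rw [hcc, hc, pvLastD_cons hne]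
    have hb := pvBlank_last hc hne
    rw [List.getLastD_eq_getLast?] at hb
    simp [pvMid, hb]
  · unfold pvSuf
    rw [hcc, pvLastD_cons hne, pvMid_cons hc]
    simp [hc]

lemma pvPre_true_false (ls : List String) : pvPre ls true false = [] := by
  cases ls with
  | nil => rfl
  | cons a t => by_cases h : pvIsEmpty a <;> simp [pvPre, h]

lemma pvPre_false_true {ls : List String} (h : ls ≠ []) : pvPre ls false true = ["\n"] := by
  cases ls with
  | nil => simp at h
  | cons a t => by_cases hb : pvIsEmpty a <;> simp [pvPre, hb]

-- main characterization of the composed passes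
lemma pvMain (ls : List String) : ∀ (p1 p2 : Bool), (p1 = false ∨ p2 = false) →
    pvFmt (pvCond ls p1) p2 = pvPre ls p1 p2 ++ pvSuf ls := by
  induction ls with
  | nil => intro p1 p2 _; simp [pvCond, pvFmt, pvPre, pvSuf, pvCs]
  | cons l ls ih =>
    intro p1 p2 hp
    by_cases h : pvIsEmpty l = true
    · -- blank head
      cases p1 with
      | true =>
        have hp2 : p2 = false := by
          cases hp with
          | inl h1 => simp at h1
          | inr h2 => exact h2
        subst hp2
        rw [show pvCond (l :: ls) true = pvCond ls true from by simp [pvCond, h]]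
        rw [ih true false (Or.inr rfl), pvPre_true_false, pvSuf_cons_blank h]
        simp [pvPre, h]
      | false =>
        rw [show pvCond (l :: ls) false = "\n" :: pvCond ls true from by simp [pvCond, h]]
        rw [show pvFmt ("\n" :: pvCond ls true) p2 = "\n" :: pvFmt (pvCond ls true) false from by
          simp [pvFmt, pvIsEmpty_nl]]
        rw [ih true false (Or.inr rfl), pvPre_true_false, pvSuf_cons_blank h]
        simp [pvPre, h]
    · -- content head
      have h' : pvIsEmpty l = false := by simpa using h
      rw [show pvCond (l :: ls) p1 = l :: pvCond ls false from by simp [pvCond, h']]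
      rw [show pvFmt (l :: pvCond ls false) p2 =
            (if p2 then ["\n"] else []) ++ (PySem.Str.rstrip l ++ "\n") :: pvFmt (pvCond ls false) true from by
        simp [pvFmt, h']]
      rw [ih false true (Or.inl rfl)]
      rw [show pvPre (l :: ls) p1 p2 = (if p2 then ["\n"] else []) from by simp [pvPre, h']]
      cases ls with
      | nil => simp [pvPre, pvSuf, pvCs, pvMid, h']
      | cons a t =>
        rw [pvPre_false_true (by simp), pvSuf_cons_content h' (by simp)]
        simp

lemma pvCs_elem_ne {ls : List String} : ∀ c ∈ pvCs ls, c ≠ "" := by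
  intro c hc
  unfold pvCs at hc
  rw [List.mem_map] at hc
  obtain ⟨l, hl, rfl⟩ := hc
  rw [List.mem_filter] at hl
  exact rstrip_ne_empty_of_content (by simpa using hl.2)

lemma pvAppend_nl_ne {c : String} (h : c ≠ "") : c ++ "\n" ≠ "\n" := by
  intro e
  apply h
  have := congrArg String.toList e
  simpa using this

lemma pvMid_ne_nil {cs : List String} (h : cs ≠ []) : pvMid cs ≠ [] := by
  cases cs with
  | nil => simp at h
  | cons a t => cases t <;> simp [pvMid]

lemma pvMid_shape {c' : String} {cs' : List String} :
    ∃ m M, pvMid (c' :: cs') = m :: M := by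
  cases hpm : pvMid (c' :: cs') with
  | nil => exact absurd hpm (pvMid_ne_nil (by simp))
  | cons m M => exact ⟨m, M, rfl⟩

lemma pvMid_last : ∀ (cs : List String), cs ≠ [] →
    ∃ c ∈ cs, (pvMid cs).getLast? = some (c ++ "\n") := by
  intro cs
  induction cs using pvMid.induct with
  | case1 => intro h; simp at h
  | case2 c => intro _; exact ⟨c, by simp, rfl⟩
  | case3 c c' cs' ih =>
    intro _
    obtain ⟨d, hd, he⟩ := ih (by simp)
    refine ⟨d, List.mem_cons_of_mem _ hd, ?_⟩
    rw [pvMid_cons (by simp)]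
    obtain ⟨m, M, hM⟩ := pvMid_shape (c' := c') (cs' := cs')
    rw [hM]
    rw [hM] at he
    simpa using he

lemma pvTrimTail_eq_self {L : List String}
    (h : ¬(1 < L.length ∧ L.getLast? = some "\n" ∧ L.dropLast.getLast? = some "\n")) :
    pvTrimTail L = L := by
  rw [pvTrimTail]
  exact if_neg h

lemma pvJoin_nil_cons (a : List Char) (rest : List (List Char)) :
    PySem.Chars.join [] (a :: rest) = a ++ PySem.Chars.join [] rest := by
  cases rest with
  | nil => simp [PySem.Chars.join_singleton, PySem.Chars.join_nil]
  | cons b t => simp [PySem.Chars.join_cons_cons]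

lemma pvJoin_nil_append (l : List (List Char)) (x : List Char) :
    PySem.Chars.join [] (l ++ [x]) = PySem.Chars.join [] l ++ x := by
  induction l with
  | nil => simp [PySem.Chars.join_singleton, PySem.Chars.join_nil]
  | cons a t ih => simp only [List.cons_append, pvJoin_nil_cons, ih, List.append_assoc]

lemma pvJoin_mid : ∀ (cs : List String),
    PySem.Str.join "" (pvMid cs) = PySem.Str.join "\n" (cs.map (fun c => c ++ "\n")) := by
  intro cs
  apply String.toList_inj.mp
  rw [PySem.Str.toList_join, PySem.Str.toList_join]
  induction cs using pvMid.induct with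
  | case1 => simp [pvMid, PySem.Chars.join_nil]
  | case2 c => simp [pvMid, PySem.Chars.join_singleton]
  | case3 c c' cs' ih =>
    rw [show pvMid (c :: c' :: cs') = (c ++ "\n") :: "\n" :: pvMid (c' :: cs') from rfl]
    have hm : "".toList = ([] : List Char) := rfl
    simp only [List.map_cons, hm, pvJoin_nil_cons, PySem.Chars.join_cons_cons] at ih ⊢
    rw [ih]
    simp

theorem pvEquiv (lines : List String) :
    format_with_blank_lines lines = format_with_blank_lines_alt lines := by
  by_cases hnil : lines = []
  · subst hnil; rfl
  unfold format_with_blank_lines format_with_blank_lines_alt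
  rw [if_neg hnil, if_neg hnil]
  simp only [pvCond_foldl, pvFmt_foldl, List.nil_append]
  rw [pvMain lines false false (Or.inl rfl)]
  rw [show (List.map PySem.Str.rstrip (List.filter (fun l => !pvIsEmpty l) lines)) = pvCs lines from rfl]
  by_cases hcs : pvCs lines = []
  · -- every line is blank: A's intermediate list is just ["\n"], trimmed away
    rw [if_pos hcs]
    obtain ⟨l, rest, rfl⟩ : ∃ l rest, lines = l :: rest := by
      cases lines with
      | nil => exact absurd rfl hnil
      | cons a t => exact ⟨a, t, rfl⟩
    have hbl : pvIsEmpty l = true := pvCs_nil_all_blank hcs l (by simp)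
    rw [show pvPre (l :: rest) false false = ["\n"] from by simp [pvPre, hbl]]
    rw [show pvSuf (l :: rest) = [] from by unfold pvSuf; rw [hcs]; simp]
    rw [show pvTrimHead (["\n"] ++ []) = [] from rfl]
    rw [pvTrimTail_eq_self (by simp)]
    rfl
  · rw [if_neg hcs]
    -- lines contain a content line
    obtain ⟨c, cs', hcsn⟩ : ∃ c cs', pvCs lines = c :: cs' := by
      cases h : pvCs lines with
      | nil => exact absurd h hcs
      | cons a t => exact ⟨a, t, rfl⟩
    obtain ⟨m, M, hM⟩ : ∃ m M, pvMid (pvCs lines) = m :: M := by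
      rw [hcsn]; exact pvMid_shape
    have hm : m = c ++ "\n" := by
      rw [hcsn] at hM
      cases cs' with
      | nil =>
        rw [show pvMid [c] = [c ++ "\n"] from rfl] at hM
        exact (List.cons.inj hM.symm).1
      | cons a t =>
        rw [pvMid_cons (by simp)] at hM
        exact (List.cons.inj hM.symm).1
    have hcne : c ≠ "" := pvCs_elem_ne c (by rw [hcsn]; simp)
    have hmne : m ≠ "\n" := by rw [hm]; exact pvAppend_nl_ne hcne
    -- the trims do nothing to the body
    set tl : List String := if pvIsEmpty (lines.getLastD "") = true then ["\n"] else [] with htl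
    have hhead : pvTrimHead (pvPre lines false false ++ (pvSuf lines)) = pvMid (pvCs lines) ++ tl := by
      have hsuf : pvSuf lines = pvMid (pvCs lines) ++ tl := by
        unfold pvSuf; rw [if_neg hcs]
      cases lines with
      | nil => exact absurd rfl hnil
      | cons a t =>
        by_cases hb : pvIsEmpty a = true
        · rw [show pvPre (a :: t) false false = ["\n"] from by simp [pvPre, hb], hsuf, hM]
          show pvTrimHead ("\n" :: m :: (M ++ tl)) = _
          rw [show pvTrimHead ("\n" :: m :: (M ++ tl)) = pvTrimHead (m :: (M ++ tl)) from by
            simp [pvTrimHead]]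
          simp [pvTrimHead, hmne]
        · rw [show pvPre (a :: t) false false = [] from by simp [pvPre, hb], hsuf, hM]
          show pvTrimHead (m :: (M ++ tl)) = _
          simp [pvTrimHead, hmne]
    rw [hhead]
    -- last element of the body is a content chunk, so the tail trim does nothing
    obtain ⟨d, hd, hlast⟩ := pvMid_last (pvCs lines) hcs
    have hdne : d ++ "\n" ≠ "\n" := pvAppend_nl_ne (pvCs_elem_ne d hd)
    have htrim : pvTrimTail (pvMid (pvCs lines) ++ tl) = pvMid (pvCs lines) ++ tl := by
      apply pvTrimTail_eq_self
      rintro ⟨-, h2, h3⟩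
      by_cases hb : pvIsEmpty (lines.getLastD "") = true
      · rw [htl, if_pos hb] at h3
        rw [List.dropLast_concat] at h3
        rw [hlast] at h3
        exact hdne (Option.some.injEq .. ▸ h3)
      · rw [htl, if_neg hb, List.append_nil] at h2
        rw [hlast] at h2
        exact hdne (Option.some.injEq .. ▸ h2)
    rw [htrim]
    -- join the pieces
    by_cases hb : pvIsEmpty (lines.getLastD "") = true
    · rw [htl, if_pos hb, if_pos hb]
      apply String.toList_inj.mp
      rw [PySem.Str.toList_join]
      rw [List.map_append]
      show PySem.Chars.join "".toList (List.map String.toList (pvMid (pvCs lines)) ++ ["\n".toList]) = _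
      rw [show "".toList = ([] : List Char) from rfl, pvJoin_nil_append]
      have := congrArg String.toList (pvJoin_mid (pvCs lines))
      rw [PySem.Str.toList_join, PySem.Str.toList_join] at this
      rw [show "".toList = ([] : List Char) from rfl] at this
      rw [this]
      simp
    · rw [htl, if_neg hb, if_neg hb, List.append_nil]
      exact pvJoin_mid (pvCs lines)

-- ===== VERDICT (by name: the statement is the Claim_ definition above) =====
theorem format_with_blank_lines_spec : Claim_equal_format_with_blank_lines := by
  intro lines _
  unfold Spec_format_with_blank_lines
  exact pvEquiv lines
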